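-- pv_equiv track=rewrite | github.com/rjwalters/kicad-tools | src/kicad_tools/placement/priors.py | _is_connector
-- ===== SOURCE A (Python) =====
-- _CONNECTOR_PREFIXES = ("J", "P", "CN", "CONN", "USB", "HDR")
--
-- def _is_connector(reference: str) -> bool:
--     """Heuristic: check if a reference designator looks like a connector."""
--     upper = reference.upper()
--     for prefix in _CONNECTOR_PREFIXES:
--         if upper.startswith(prefix) and (
--             len(upper) == len(prefix) or upper[len(prefix) :].lstrip("0123456789") == ""
--         ):
--             return True
--     return False
-- ===== SOURCE B (Python) =====
-- _CONNECTOR_CORES = frozenset({"J", "P", "CN", "CONN", "USB", "HDR"})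
--
-- def _is_connector(reference: str) -> bool:
--     """Heuristic: check if a reference designator looks like a connector."""
--     core = reference.upper().rstrip("0123456789")
--     return core in _CONNECTOR_CORES
-- ===== Notes on version B (the rewrite author's own statement) =====
-- stated objective: simpler
-- what changed: Replaced the loop over prefixes with its dual startswith/all-digit-suffix test by a single strip of the trailing ASCII-digit run followed by one set-membership test of the remaining core.
import Mathlib
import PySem

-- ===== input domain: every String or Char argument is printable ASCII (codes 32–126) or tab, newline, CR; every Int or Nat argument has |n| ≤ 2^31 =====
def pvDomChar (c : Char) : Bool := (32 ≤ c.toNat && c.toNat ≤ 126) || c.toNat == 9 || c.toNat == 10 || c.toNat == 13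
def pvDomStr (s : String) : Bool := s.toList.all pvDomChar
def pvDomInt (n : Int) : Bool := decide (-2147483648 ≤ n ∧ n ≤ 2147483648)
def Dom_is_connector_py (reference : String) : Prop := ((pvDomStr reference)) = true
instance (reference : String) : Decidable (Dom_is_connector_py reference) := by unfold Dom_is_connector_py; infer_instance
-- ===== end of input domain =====

-- B replaces A's prefix loop (startswith + all-digit-suffix test per prefix) by one
-- trailing-digit strip plus a single membership test of the core; objective: simpler.


-- ===== PORT A =====
-- membership of a char in the chars-argument "0123456789" of lstrip; exact (ASCII digits)
def pvIsDig (c : Char) : Bool :=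
  (['0','1','2','3','4','5','6','7','8','9'] : List Char).contains c

-- _CONNECTOR_PREFIXES = ("J", "P", "CN", "CONN", "USB", "HDR"), as char lists
def connectorPrefixes : List (List Char) :=
  [['J'], ['P'], ['C','N'], ['C','O','N','N'], ['U','S','B'], ['H','D','R']]

-- the for-loop over _CONNECTOR_PREFIXES; upper[len(prefix):].lstrip("0123456789") == ""
-- is ported by hand as dropWhile pvIsDig (drop …) = [] (PySem has no lstrip-with-chars) — exact
def isConnLoop (u : List Char) : List (List Char) → Bool
  | [] => false
  | p :: rest =>
      if PySem.Chars.startswith u p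
          && (decide (u.length = p.length) || decide ((u.drop p.length).dropWhile pvIsDig = [])) then
        true
      else isConnLoop u rest

def is_connector_py (reference : String) : Bool :=
  isConnLoop (PySem.Str.upper reference).toList connectorPrefixes

-- ===== PORT B =====
-- Source B's rstrip("0123456789") (remove the maximal trailing run of ASCII digits) has no PySem
-- primitive; it is ported by hand as this structural recursion, exact on all inputs:
-- a digit is kept exactly when some later character is a non-digit.
def bDigit (c : Char) : Bool := "0123456789".toList.contains c

def bCore : List Char → List Char
  | [] => []
  | c :: cs =>
      match bCore cs with
      | [] => if bDigit c then [] else [c]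
      | r  => c :: r

-- core in _CONNECTOR_CORES: one membership test of the stripped core
def is_connector_py_alt (reference : String) : Bool :=
  let core := bCore (PySem.Str.upper reference).toList
  core == "J".toList || core == "P".toList || core == "CN".toList
    || core == "CONN".toList || core == "USB".toList || core == "HDR".toList

-- ===== PRECONDITION & SPEC =====
def Spec_is_connector_py (reference : String) (out : Bool) : Prop := out = is_connector_py_alt reference
instance (reference : String) (out : Bool) : Decidable (Spec_is_connector_py reference out) := by unfold Spec_is_connector_py; infer_instance

-- ===== CLAIM (what is proved, stated in full; the proofs are below) =====
def Claim_equal_is_connector_py : Prop := ∀ (reference : String), Dom_is_connector_py reference → Spec_is_connector_py reference (is_connector_py reference)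

-- ===== LEMMAS AND PROOFS =====

theorem dig_eq : ∀ c, pvIsDig c = bDigit c := by intro c; rfl

-- bCore is the trailing-digit strip
theorem bCore_eq_rdropWhile (l : List Char) :
    bCore l = List.rdropWhile pvIsDig l := by
  induction l with
  | nil => rfl
  | cons c cs ih =>
    have hstep : List.rdropWhile pvIsDig (c :: cs)
        = match List.rdropWhile pvIsDig cs with
          | [] => if pvIsDig c then [] else [c]
          | r  => c :: r := by
      rw [List.rdropWhile, show (c :: cs).reverse = cs.reverse ++ [c] by simp,
        List.dropWhile_append]
      simp only [List.isEmpty_iff]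
      by_cases h : List.dropWhile pvIsDig cs.reverse = []
      · have hr : List.rdropWhile pvIsDig cs = [] := by
          rw [List.rdropWhile, h]; rfl
        rw [if_pos h, hr]
        by_cases hc : pvIsDig c <;> simp [List.dropWhile, hc]
      · have hr : List.rdropWhile pvIsDig cs ≠ [] := by
          rw [List.rdropWhile]; simpa using h
        rw [if_neg h]
        cases hcs : List.rdropWhile pvIsDig cs with
        | nil => exact absurd hcs hr
        | cons a as =>
          have : (List.dropWhile pvIsDig cs.reverse).reverse = a :: as := by
            rw [← List.rdropWhile, hcs]
          simp [← this]
    rw [hstep, bCore, ih]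
    cases List.rdropWhile pvIsDig cs <;> simp [dig_eq]

-- For an all-non-digit prefix p: A's per-prefix condition holds iff
-- stripping the trailing digit run of u yields exactly p.
theorem key_cond (p u : List Char) (hnd : ∀ x ∈ p, pvIsDig x = false) :
    (PySem.Chars.startswith u p
        && (decide (u.length = p.length) || decide ((u.drop p.length).dropWhile pvIsDig = [])))
      = decide (List.rdropWhile pvIsDig u = p) := by
  rcases Bool.eq_false_or_eq_true (PySem.Chars.startswith u p) with hs | hs
  case inr =>
    rw [hs, Bool.false_and]
    symm
    rw [decide_eq_false_iff_not]
    intro he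
    have hpref : p <+: u := he ▸ List.rdropWhile_prefix pvIsDig u
    have := (PySem.Chars.startswith_iff u p).mpr hpref
    rw [hs] at this
    exact Bool.false_ne_true this
  case inl =>
    rw [hs, Bool.true_and]
    obtain ⟨t, ht⟩ := (PySem.Chars.startswith_iff u p).mp hs
    subst ht
    have hdrop : (p ++ t).drop p.length = t := by simp
    rw [hdrop]
    have hiff : List.rdropWhile pvIsDig (p ++ t) = p ↔ ∀ x ∈ t, pvIsDig x = true := by
      constructor
      · intro he x hx
        have hsplit := List.rdropWhile_append_rtakeWhile (p := pvIsDig) (l := p ++ t)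
        rw [he] at hsplit
        have ht' : List.rtakeWhile pvIsDig (p ++ t) = t := List.append_cancel_left hsplit
        exact List.mem_rtakeWhile_imp (ht' ▸ hx)
      · intro hall
        rw [List.rdropWhile, List.reverse_append, List.dropWhile_append]
        have h1 : List.dropWhile pvIsDig t.reverse = [] := by
          rw [List.dropWhile_eq_nil_iff]
          intro x hx; exact hall x (List.mem_reverse.mp hx)
        rw [h1]
        have h2 : List.dropWhile pvIsDig p.reverse = p.reverse := by
          rw [List.dropWhile_eq_self_iff]
          intro hh
          have hm : p.reverse[0] ∈ p := List.mem_reverse.mp (List.getElem_mem hh)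
          simpa using hnd _ hm
        simp [h2]
    by_cases hr : List.rdropWhile pvIsDig (p ++ t) = p
    · have hall := hiff.mp hr
      have h2 : List.dropWhile pvIsDig t = [] := List.dropWhile_eq_nil_iff.mpr hall
      simp [hr, h2]
    · have hnall := (not_iff_not.mpr hiff).mp hr
      push Not at hnall
      obtain ⟨x, hx, hdx⟩ := hnall
      have htne : t ≠ [] := by rintro rfl; simp at hx
      have h1 : ¬ (p ++ t).length = p.length := by
        simp only [List.length_append]
        intro hl
        exact htne (List.eq_nil_of_length_eq_zero (by omega))
      have h2 : ¬ List.dropWhile pvIsDig t = [] := by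
        rw [List.dropWhile_eq_nil_iff]
        push Not
        exact ⟨x, hx, hdx⟩
      simp [hr, h2, htne]

theorem loop_eq (u : List Char) :
    isConnLoop u connectorPrefixes
      = (bCore u == "J".toList || bCore u == "P".toList || bCore u == "CN".toList
          || bCore u == "CONN".toList || bCore u == "USB".toList || bCore u == "HDR".toList) := by
  have h1 := key_cond ['J'] u (by intro x hx; fin_cases hx <;> rfl)
  have h2 := key_cond ['P'] u (by intro x hx; fin_cases hx <;> rfl)
  have h3 := key_cond ['C','N'] u (by intro x hx; fin_cases hx <;> rfl)
  have h4 := key_cond ['C','O','N','N'] u (by intro x hx; fin_cases hx <;> rfl)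
  have h5 := key_cond ['U','S','B'] u (by intro x hx; fin_cases hx <;> rfl)
  have h6 := key_cond ['H','D','R'] u (by intro x hx; fin_cases hx <;> rfl)
  have e1 : ("J".toList) = ['J'] := rfl
  have e2 : ("P".toList) = ['P'] := rfl
  have e3 : ("CN".toList) = ['C','N'] := rfl
  have e4 : ("CONN".toList) = ['C','O','N','N'] := rfl
  have e5 : ("USB".toList) = ['U','S','B'] := rfl
  have e6 : ("HDR".toList) = ['H','D','R'] := rfl
  rw [bCore_eq_rdropWhile, e1, e2, e3, e4, e5, e6]
  simp only [isConnLoop, connectorPrefixes, h1, h2, h3, h4, h5, h6]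
  generalize List.rdropWhile pvIsDig u = v
  by_cases c1 : v = ['J'] <;>
  by_cases c2 : v = ['P'] <;>
  by_cases c3 : v = ['C','N'] <;>
  by_cases c4 : v = ['C','O','N','N'] <;>
  by_cases c5 : v = ['U','S','B'] <;>
  by_cases c6 : v = ['H','D','R'] <;>
    simp [c1, c2, c3, c4, c5, c6]

-- ===== VERDICT (by name: the statement is the Claim_ definition above) =====
theorem is_connector_py_spec : Claim_equal_is_connector_py := by
  intro reference _
  unfold Spec_is_connector_py is_connector_py is_connector_py_alt
  exact loop_eq _
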